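-- pv_equiv track=rewrite | github.com/ausmeyer/flu_lightgbm_shap_submission | analysis.py | find_site
-- ===== SOURCE A (Python) =====
-- def find_site(onehot_encoder_categories, feature_index, site_offset):
--     """
--     Finds the protein site number and amino acid from a OneHotEncoder feature index.
--
--     Args:
--         onehot_encoder_categories: The `categories_` attribute of the fitted OneHotEncoder.
--         feature_index: The numerical index of the feature in the transformed array.
--         site_offset: Offset to subtract from FASTA position for protein numbering.
--
--     Returns:
--         tuple: (protein_site_number, amino_acid, all_options_at_site)
--                Returns (-1, 'N/A', []) if index corresponds to a cleaved site (protein_site < 1).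
--                Returns (-2, 'NonSequenceFeature', []) if index is out of bounds of sequence features (e.g., time, lat, lon).
--                Site number is 1-based protein numbering (FASTA position - offset).
--     """
--     current_index = 0
--     for site_idx_fasta, category_list in enumerate(onehot_encoder_categories): # site_idx_fasta is 0-based index corresponding to FASTA s1, s2...
--         num_categories = len(category_list)
--         if feature_index < current_index + num_categories:
--             amino_acid = category_list[feature_index - current_index]
--             # Calculate protein site number: 1-based FASTA position - offset
--             fasta_position = site_idx_fasta + 1
--             protein_site_num = fasta_position - site_offset
--             # Only return positive protein site numbers; sites within the offset region are considered non-protein (-1)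
--             if protein_site_num < 1:
--                  protein_site_num = -1 # Indicator for cleaved sites
--                  amino_acid = 'N/A'      # Label for cleaved sites
--
--             return protein_site_num, amino_acid, category_list
--         current_index += num_categories
--     # If index is beyond sequence features (e.g., time, lat, lon)
--     # We will assign the actual feature name later in the processing functions
--     return -2, 'NonSequenceFeature', [] # Indicate feature is not a sequence site
-- ===== SOURCE B (Python) =====
-- def find_site(onehot_encoder_categories, feature_index, site_offset):
--     # Prefix sums of category sizes + binary search for the owning site,
--     # instead of A's linear scan with a running index.
--     total = 0
--     prefix = [0]
--     for c in onehot_encoder_categories: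
--         total += len(c)
--         prefix.append(total)
--     n = len(onehot_encoder_categories)
--     lo, hi = 0, n
--     while lo < hi:
--         mid = (lo + hi) // 2
--         if feature_index < prefix[mid + 1]:
--             hi = mid
--         else:
--             lo = mid + 1
--     if lo == n:
--         return -2, 'NonSequenceFeature', []
--     cat = onehot_encoder_categories[lo]
--     aa = cat[feature_index - prefix[lo]]
--     site = lo + 1 - site_offset
--     if site < 1:
--         return -1, 'N/A', cat
--     return site, aa, cat
-- ===== Notes on version B (the rewrite author's own statement) =====
-- stated objective: alternative
-- what changed: Replaces A's linear scan with a running index by a precomputed prefix-sum array of category sizes plus a binary search for the site owning the feature index.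
import Mathlib
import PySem

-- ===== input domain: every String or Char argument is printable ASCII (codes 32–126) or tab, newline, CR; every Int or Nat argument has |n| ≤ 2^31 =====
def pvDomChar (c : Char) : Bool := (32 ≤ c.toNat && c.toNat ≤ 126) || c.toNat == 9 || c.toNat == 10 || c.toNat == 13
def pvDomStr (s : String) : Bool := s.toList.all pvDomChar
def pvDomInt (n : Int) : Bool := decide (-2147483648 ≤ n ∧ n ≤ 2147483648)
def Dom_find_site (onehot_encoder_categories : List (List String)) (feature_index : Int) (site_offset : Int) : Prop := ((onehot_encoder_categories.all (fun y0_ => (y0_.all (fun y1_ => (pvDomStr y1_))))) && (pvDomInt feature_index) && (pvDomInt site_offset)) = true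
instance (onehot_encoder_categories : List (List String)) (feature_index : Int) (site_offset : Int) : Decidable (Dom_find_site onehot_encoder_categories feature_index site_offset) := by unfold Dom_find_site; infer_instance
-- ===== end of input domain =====

-- B replaces A's linear scan by a prefix-sum array of category sizes plus a binary search
-- for the site owning the feature index (alternative data structure, same results).

-- ===== PORT A =====
def find_site_go (cats : List (List String)) (fi off cur : Int) (idx : Nat) : Int × String × List String :=
  match cats with
  | [] => (-2, "NonSequenceFeature", [])
  | c :: rest =>
    if fi < cur + (c.length : Int) then
      -- category_list[feature_index - current_index]; outside Pre_ Python raises, pyGet? is none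
      let aa := (PySem.List.pyGet? c (fi - cur)).getD ""
      let p : Int := ((idx : Int) + 1) - off
      if p < 1 then (-1, "N/A", c) else (p, aa, c)
    else find_site_go rest fi off (cur + (c.length : Int)) (idx + 1)

def find_site (onehot_encoder_categories : List (List String)) (feature_index : Int) (site_offset : Int) : Int × String × List String :=
  find_site_go onehot_encoder_categories feature_index site_offset 0 0

-- ===== PORT B =====
-- while lo < hi binary search over the prefix array (Source B's loop)
def find_site_bs (pfx : List Int) (fi : Int) (lo hi : Nat) : Nat :=
  if _ : lo < hi then
    let mid := (lo + hi) / 2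
    if fi < pfx.getD (mid + 1) 0 then find_site_bs pfx fi lo mid
    else find_site_bs pfx fi (mid + 1) hi
  else lo
termination_by hi - lo
decreasing_by all_goals omega

def find_site_alt (onehot_encoder_categories : List (List String)) (feature_index : Int) (site_offset : Int) : Int × String × List String :=
  -- prefix-sum build (Source B's first loop, state = (total, prefix))
  let pfx := (onehot_encoder_categories.foldl
      (fun (s : Int × List Int) c => (s.1 + (c.length : Int), s.2 ++ [s.1 + (c.length : Int)]))
      (0, [0])).2
  let n := onehot_encoder_categories.length
  let lo := find_site_bs pfx feature_index 0 n
  if lo = n then (-2, "NonSequenceFeature", [])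
  else
    let cat := onehot_encoder_categories.getD lo []
    let aa := (PySem.List.pyGet? cat (feature_index - pfx.getD lo 0)).getD ""
    let site : Int := (lo : Int) + 1 - site_offset
    if site < 1 then (-1, "N/A", cat) else (site, aa, cat)

-- ===== PRECONDITION & SPEC =====
-- Pre_ excludes exactly the inputs where Python A raises IndexError (a negative feature_index
-- whose magnitude exceeds the first category list's length, with a nonempty category list);
-- B's Python raises IndexError there too.
def Pre_find_site (onehot_encoder_categories : List (List String)) (feature_index : Int) (site_offset : Int) : Prop :=
  0 ≤ feature_index ∨ onehot_encoder_categories = [] ∨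
    0 ≤ feature_index + ((onehot_encoder_categories.headD []).length : Int)
instance (onehot_encoder_categories : List (List String)) (feature_index : Int) (site_offset : Int) : Decidable (Pre_find_site onehot_encoder_categories feature_index site_offset) := by unfold Pre_find_site; infer_instance

def pvWitness_find_site : List (List String) × Int × Int := ([["A", "C"], ["G"]], 1, 0)

def Spec_find_site (onehot_encoder_categories : List (List String)) (feature_index : Int) (site_offset : Int) (out : Int × String × List String) : Prop := out = find_site_alt onehot_encoder_categories feature_index site_offset
instance (onehot_encoder_categories : List (List String)) (feature_index : Int) (site_offset : Int) (out : Int × String × List String) : Decidable (Spec_find_site onehot_encoder_categories feature_index site_offset out) := by unfold Spec_find_site; infer_instance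

-- ===== CLAIM (what is proved, stated in full; the proofs are below) =====
def Claim_equal_find_site : Prop := ∀ (onehot_encoder_categories : List (List String)) (feature_index : Int) (site_offset : Int), Dom_find_site onehot_encoder_categories feature_index site_offset → Pre_find_site onehot_encoder_categories feature_index site_offset → Spec_find_site onehot_encoder_categories feature_index site_offset (find_site onehot_encoder_categories feature_index site_offset)

-- ===== LEMMAS AND PROOFS =====

-- index of the first site whose category block contains the feature index (length if none)
def fsL : List (List String) → Int → Nat
  | [], _ => 0
  | c :: rest, fi => if fi < (c.length : Int) then 0 else fsL rest (fi - (c.length : Int)) + 1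

-- sum of the first j category sizes
def fsSum : List (List String) → Nat → Int
  | _, 0 => 0
  | [], _ + 1 => 0
  | c :: rest, j + 1 => (c.length : Int) + fsSum rest j

-- tail of the prefix array as a structural recursion
def fsPfx : Int → List (List String) → List Int
  | _, [] => []
  | t, c :: rest => (t + (c.length : Int)) :: fsPfx (t + (c.length : Int)) rest

theorem fsL_le_length (cats : List (List String)) (fi : Int) : fsL cats fi ≤ cats.length := by
  induction cats generalizing fi with
  | nil => simp [fsL]
  | cons c rest ih =>
    simp only [fsL, List.length_cons]
    split
    · omega
    · exact Nat.succ_le_succ (ih _)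

theorem fsSum_nonneg (cats : List (List String)) (j : Nat) : 0 ≤ fsSum cats j := by
  induction cats generalizing j with
  | nil => cases j <;> simp [fsSum]
  | cons c rest ih =>
    cases j with
    | zero => simp [fsSum]
    | succ j => have := ih j; simp only [fsSum]; positivity

theorem fsL_iff (cats : List (List String)) (fi : Int) (m : Nat) (hm : m < cats.length) :
    (fi < fsSum cats (m + 1)) ↔ fsL cats fi ≤ m := by
  induction cats generalizing fi m with
  | nil => simp at hm
  | cons c rest ih =>
    simp only [fsSum, fsL]
    split
    · rename_i h
      have := fsSum_nonneg rest m
      constructor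
      · intro _; omega
      · intro _; omega
    · rename_i h
      cases m with
      | zero =>
        simp only [fsSum]
        constructor
        · intro h'; omega
        · intro h'; omega
      | succ m =>
        have hm' : m < rest.length := by simpa using hm
        have hiff := ih (fi - (c.length : Int)) m hm'
        constructor
        · intro h'
          have : fi - (c.length : Int) < fsSum rest (m + 1) := by omega
          have := hiff.mp this
          omega
        · intro h'
          have : fsL rest (fi - (c.length : Int)) ≤ m := by omega
          have := hiff.mpr this
          omega

theorem fsPfx_getD (cats : List (List String)) (t : Int) (j : Nat) (hj : j < cats.length) :
    (fsPfx t cats).getD j 0 = t + fsSum cats (j + 1) := by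
  induction cats generalizing t j with
  | nil => simp at hj
  | cons c rest ih =>
    cases j with
    | zero => simp [fsPfx, fsSum]
    | succ j =>
      have hj' : j < rest.length := by simpa using hj
      simp only [fsPfx, List.getD_cons_succ, fsSum]
      rw [ih _ _ hj']
      ring

theorem foldl_pfx (cats : List (List String)) (t : Int) (acc : List Int) :
    (cats.foldl (fun (s : Int × List Int) c => (s.1 + (c.length : Int), s.2 ++ [s.1 + (c.length : Int)])) (t, acc)).2
      = acc ++ fsPfx t cats := by
  induction cats generalizing t acc with
  | nil => simp [fsPfx]
  | cons c rest ih =>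
    simp only [List.foldl_cons, fsPfx]
    rw [ih]
    simp

theorem pfx_getD (cats : List (List String)) (j : Nat) (hj : j ≤ cats.length) :
    ((0 : Int) :: fsPfx 0 cats).getD j 0 = fsSum cats j := by
  cases j with
  | zero => simp [fsSum]
  | succ j =>
    have hj' : j < cats.length := by omega
    simp only [List.getD_cons_succ]
    rw [fsPfx_getD _ _ _ hj']
    ring

theorem bs_correct (cats : List (List String)) (fi : Int) (pfx : List Int)
    (hp : ∀ j, j ≤ cats.length → pfx.getD j 0 = fsSum cats j)
    (lo hi : Nat) (h1 : lo ≤ fsL cats fi) (h2 : fsL cats fi ≤ hi) (h3 : hi ≤ cats.length) :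
    find_site_bs pfx fi lo hi = fsL cats fi := by
  unfold find_site_bs
  split
  · rename_i hlt
    show (if fi < pfx.getD ((lo + hi) / 2 + 1) 0 then find_site_bs pfx fi lo ((lo + hi) / 2)
          else find_site_bs pfx fi ((lo + hi) / 2 + 1) hi) = fsL cats fi
    have hmid1 : (lo + hi) / 2 < hi := by omega
    have hmid2 : lo ≤ (lo + hi) / 2 := by omega
    rw [hp ((lo + hi) / 2 + 1) (by omega)]
    have hiff := fsL_iff cats fi ((lo + hi) / 2) (by omega)
    split
    · rename_i hcond
      exact bs_correct cats fi pfx hp lo ((lo + hi) / 2) h1 (hiff.mp hcond) (by omega)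
    · rename_i hcond
      have : ¬ fsL cats fi ≤ (lo + hi) / 2 := fun h => hcond (hiff.mpr h)
      exact bs_correct cats fi pfx hp ((lo + hi) / 2 + 1) hi (by omega) h2 h3
  · omega
termination_by hi - lo
decreasing_by all_goals omega

theorem go_eq (cats : List (List String)) (fi off cur : Int) (idx : Nat) :
    find_site_go cats fi off cur idx =
      (if fsL cats (fi - cur) < cats.length then
        (if ((idx + fsL cats (fi - cur) : Nat) : Int) + 1 - off < 1 then
          (-1, "N/A", cats.getD (fsL cats (fi - cur)) [])
        else
          (((idx + fsL cats (fi - cur) : Nat) : Int) + 1 - off,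
           (PySem.List.pyGet? (cats.getD (fsL cats (fi - cur)) [])
             (fi - cur - fsSum cats (fsL cats (fi - cur)))).getD "",
           cats.getD (fsL cats (fi - cur)) []))
      else (-2, "NonSequenceFeature", [])) := by
  induction cats generalizing fi cur idx with
  | nil => simp [find_site_go, fsL]
  | cons c rest ih =>
    simp only [find_site_go]
    by_cases h : fi < cur + (c.length : Int)
    · have hL : fsL (c :: rest) (fi - cur) = 0 := by
        simp only [fsL]; rw [if_pos (by omega)]
      rw [if_pos h, hL]
      simp [fsSum]
    · have hL : fsL (c :: rest) (fi - cur) = fsL rest (fi - cur - (c.length : Int)) + 1 := by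
        simp only [fsL]; rw [if_neg (by omega)]
      rw [if_neg h, ih fi (cur + (c.length : Int)) (idx + 1), hL]
      have harg : fi - (cur + (c.length : Int)) = fi - cur - (c.length : Int) := by ring
      rw [harg]
      simp only [List.getD_cons_succ, List.length_cons, fsSum, Nat.add_lt_add_iff_right]
      by_cases hlt : fsL rest (fi - cur - (c.length : Int)) < rest.length
      · rw [if_pos hlt, if_pos hlt]
        have ep : ((idx + 1 + fsL rest (fi - cur - (c.length : Int)) : Nat) : Int)
            = ((idx + (fsL rest (fi - cur - (c.length : Int)) + 1) : Nat) : Int) := by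
          push_cast; ring
        have e2 : fi - cur - (c.length : Int) - fsSum rest (fsL rest (fi - cur - (c.length : Int)))
            = fi - cur - ((c.length : Int) + fsSum rest (fsL rest (fi - cur - (c.length : Int)))) := by
          ring
        rw [ep, e2]
      · rw [if_neg hlt, if_neg hlt]

-- ===== VERDICT (by name: the statement is the Claim_ definition above) =====
theorem find_site_spec : Claim_equal_find_site := by
  intro cats fi off _ _
  unfold Spec_find_site find_site find_site_alt
  rw [foldl_pfx]
  have hpfx : ∀ j, j ≤ cats.length → ((0 : Int) :: fsPfx 0 cats).getD j 0 = fsSum cats j :=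
    fun j hj => pfx_getD cats j hj
  show find_site_go cats fi off 0 0 =
    (if find_site_bs ((0 : Int) :: fsPfx 0 cats) fi 0 cats.length = cats.length then
      (-2, "NonSequenceFeature", [])
    else
      (if ((find_site_bs ((0 : Int) :: fsPfx 0 cats) fi 0 cats.length : Int) + 1 - off) < 1 then
        (-1, "N/A", cats.getD (find_site_bs ((0 : Int) :: fsPfx 0 cats) fi 0 cats.length) [])
      else
        ((find_site_bs ((0 : Int) :: fsPfx 0 cats) fi 0 cats.length : Int) + 1 - off,
         (PySem.List.pyGet? (cats.getD (find_site_bs ((0 : Int) :: fsPfx 0 cats) fi 0 cats.length) [])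
           (fi - ((0 : Int) :: fsPfx 0 cats).getD (find_site_bs ((0 : Int) :: fsPfx 0 cats) fi 0 cats.length) 0)).getD "",
         cats.getD (find_site_bs ((0 : Int) :: fsPfx 0 cats) fi 0 cats.length) [])))
  rw [bs_correct cats fi _ hpfx 0 cats.length (Nat.zero_le _) (fsL_le_length cats fi) le_rfl]
  rw [go_eq]
  simp only [sub_zero, Nat.zero_add]
  by_cases h : fsL cats fi < cats.length
  · rw [if_pos h, if_neg (show ¬ fsL cats fi = cats.length by omega),
        hpfx (fsL cats fi) (by omega)]
  · rw [if_neg h,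
        if_pos (show fsL cats fi = cats.length by have := fsL_le_length cats fi; omega)]
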